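-- pv_equiv track=rewrite | github.com/oeyh98/algorithm | 프로그래머스/2/142085. 디펜스 게임/디펜스 게임.py | solution
-- ===== SOURCE A (Python) =====
-- import heapq
--
-- def solution(n, k, enemy):
--     answer = 0
--     heap = []
--     total = 0
--     for e in enemy :
--         heapq.heappush(heap, -e)
--         total += e
--         if total > n :
--             if k == 0 :
--                 break
--             k -= 1
--             total += heapq.heappop(heap)
--
--         else:
--             n -= e
--             total -= e
--
--         answer += 1
--     return answer
-- ===== SOURCE B (Python) =====
-- def _insort(e, lst):
--     # insert e into ascending lst, in place, via binary search (bisect_right)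
--     lo, hi = 0, len(lst)
--     while lo < hi:
--         mid = (lo + hi) // 2
--         if e < lst[mid]:
--             hi = mid
--         else:
--             lo = mid + 1
--     lst.insert(lo, e)
--
-- def solution(n, k, enemy):
--     answer = 0
--     kept = []   # waves currently paid by soldiers, ascending
--     s = 0       # sum(kept)
--     for e in enemy:
--         _insort(e, kept)
--         s += e
--         if s > n:           # soldiers can no longer cover all kept waves
--             if k == 0:
--                 break
--             k -= 1
--             s -= kept.pop() # spend a skill on the largest kept wave
--         answer += 1
--     return answer
-- ===== Notes on version B (the rewrite author's own statement) =====
-- stated objective: alternative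
-- what changed: B drops A's heapq max-heap of negated values with its total/n running-offset bookkeeping and instead keeps the currently-paid waves in an ascending list maintained by hand-written binary-search insertion, with a cached sum compared against the unchanged original n, popping the last (largest) element when a skill is spent.
import Mathlib
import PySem

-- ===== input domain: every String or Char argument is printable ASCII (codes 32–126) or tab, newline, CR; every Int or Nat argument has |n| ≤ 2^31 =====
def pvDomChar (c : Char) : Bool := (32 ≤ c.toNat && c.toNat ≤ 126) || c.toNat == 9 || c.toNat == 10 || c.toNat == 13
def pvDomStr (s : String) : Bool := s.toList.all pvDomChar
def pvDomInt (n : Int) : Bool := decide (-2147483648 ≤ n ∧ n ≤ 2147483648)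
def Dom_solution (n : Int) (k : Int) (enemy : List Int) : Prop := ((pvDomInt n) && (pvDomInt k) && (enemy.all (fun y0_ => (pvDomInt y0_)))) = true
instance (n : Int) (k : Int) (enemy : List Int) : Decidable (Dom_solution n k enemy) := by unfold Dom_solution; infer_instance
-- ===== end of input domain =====

-- B replaces A's negated max-heap plus total/n offset bookkeeping by an ascending sorted list
-- of the actually-kept waves with a cached sum compared against the original n (alternative).


-- ===== PORT A =====
-- heapq heap of negated values: a min-ordered sorted list; heappush = ordered insert,
-- heappop = take the head (exact in observable value, as only the minimum is ever read).
def solutionLoopA (rest : List Int) (answer : Int) (heap : List Int)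
    (total : Int) (n : Int) (k : Int) : Int :=
  match rest with
  | [] => answer
  | e :: rest =>
    let heap := List.orderedInsert (· ≤ ·) (-e) heap
    let total := total + e
    if total > n then
      if k = 0 then answer
      else
        match heap with
        | [] => answer -- unreachable: the heap is nonempty right after the push
        | h :: t => solutionLoopA rest (answer + 1) t (total + h) n (k - 1)
    else solutionLoopA rest (answer + 1) heap (total - e) (n - e) k

def solution (n : Int) (k : Int) (enemy : List Int) : Int :=
  solutionLoopA enemy 0 [] 0 n k

-- ===== PORT B =====
-- _insort from Source B: binary search (bisect_right) for the insertion point, then insert there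
def bisectLoop (e : Int) (lst : List Int) (lo hi : Nat) : Nat :=
  if lo < hi then
    let mid := (lo + hi) / 2
    if e < lst.getD mid 0 then bisectLoop e lst lo mid
    else bisectLoop e lst (mid + 1) hi
  else lo
termination_by hi - lo
decreasing_by all_goals omega

def insortB (e : Int) (lst : List Int) : List Int :=
  let lo := bisectLoop e lst 0 lst.length
  lst.take lo ++ e :: lst.drop lo

def solutionLoopB (n : Int) (rest : List Int) (answer : Int) (kept : List Int)
    (s : Int) (k : Int) : Int :=
  match rest with
  | [] => answer
  | e :: rest =>
    let kept := insortB e kept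
    let s := s + e
    if s > n then
      if k = 0 then answer
      else
        match kept.getLast? with
        | none => answer -- unreachable: kept is nonempty right after the insertion
        | some m => solutionLoopB n rest (answer + 1) kept.dropLast (s - m) (k - 1)
    else solutionLoopB n rest (answer + 1) kept s k

def solution_alt (n : Int) (k : Int) (enemy : List Int) : Int :=
  solutionLoopB n enemy 0 [] 0 k

-- ===== PRECONDITION & SPEC =====
def Spec_solution (n : Int) (k : Int) (enemy : List Int) (out : Int) : Prop := out = solution_alt n k enemy
instance (n : Int) (k : Int) (enemy : List Int) (out : Int) : Decidable (Spec_solution n k enemy out) := by unfold Spec_solution; infer_instance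

-- ===== CLAIM (what is proved, stated in full; the proofs are below) =====
def Claim_equal_solution : Prop := ∀ (n : Int) (k : Int) (enemy : List Int), Dom_solution n k enemy → Spec_solution n k enemy (solution n k enemy)

-- ===== LEMMAS AND PROOFS =====

-- proof-side left-to-right insertion, easier to reason about than the reversed scan
def insortL (e : Int) : List Int → List Int
  | [] => [e]
  | x :: t => if e < x then e :: x :: t else x :: insortL e t


theorem insortL_ne_nil (e : Int) (H : List Int) : insortL e H ≠ [] := by
  cases H with
  | nil => simp [insortL]
  | cons x t => simp only [insortL]; split <;> simp

theorem perm_insortL (e : Int) (H : List Int) : (insortL e H).Perm (e :: H) := by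
  induction H with
  | nil => simp [insortL]
  | cons x t ih =>
    simp only [insortL]
    split
    · exact List.Perm.refl _
    · exact (ih.cons x).trans (List.Perm.swap e x t)

theorem sorted_insortL {e : Int} {H : List Int} (h : H.Pairwise (· ≤ ·)) :
    (insortL e H).Pairwise (· ≤ ·) := by
  induction H with
  | nil => simp [insortL]
  | cons x t ih =>
    simp only [insortL]
    rcases List.pairwise_cons.mp h with ⟨hx, ht⟩
    split
    · rename_i hlt
      refine List.pairwise_cons.mpr ⟨?_, h⟩
      intro b hb
      rcases List.mem_cons.mp hb with rfl | hb
      · omega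
      · exact le_trans (le_of_lt hlt) (hx _ hb)
    · rename_i hnlt
      refine List.pairwise_cons.mpr ⟨?_, ih ht⟩
      intro b hb
      rcases List.mem_cons.mp ((perm_insortL e t).mem_iff.mp hb) with rfl | hb
      · omega
      · exact hx _ hb

theorem sorted_getD {lst : List Int} (hs : lst.Pairwise (· ≤ ·)) {i j : Nat}
    (hij : i ≤ j) (hj : j < lst.length) : lst.getD i 0 ≤ lst.getD j 0 := by
  rcases Nat.lt_or_ge i j with h | h
  · rw [List.getD_eq_getElem lst 0 (by omega), List.getD_eq_getElem lst 0 hj]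
    exact List.pairwise_iff_getElem.mp hs i j (by omega) hj h
  · have : i = j := by omega
    subst this; rfl

theorem bisectLoop_spec (e : Int) (lst : List Int) (hs : lst.Pairwise (· ≤ ·)) :
    ∀ (lo hi : Nat), lo ≤ hi → hi ≤ lst.length →
    (∀ j, j < lo → lst.getD j 0 ≤ e) →
    (∀ j, hi ≤ j → j < lst.length → e < lst.getD j 0) →
    bisectLoop e lst lo hi ≤ hi ∧
    (∀ j, j < bisectLoop e lst lo hi → lst.getD j 0 ≤ e) ∧
    (∀ j, bisectLoop e lst lo hi ≤ j → j < lst.length → e < lst.getD j 0) := by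
  intro lo hi
  fun_induction bisectLoop e lst lo hi with
  | case1 lo hi hlt mid hcmp ih =>
    intro _ hhi h1 h2
    have hmid : lo ≤ mid ∧ mid < hi := by have h : mid = (lo + hi) / 2 := rfl; omega
    have h2' : ∀ j, mid ≤ j → j < lst.length → e < lst.getD j 0 := by
      intro j hj hjl
      exact lt_of_lt_of_le hcmp (sorted_getD hs hj hjl)
    obtain ⟨ha, hb, hc⟩ := ih hmid.1 (by omega) h1 h2'
    exact ⟨by omega, hb, hc⟩
  | case2 lo hi hlt mid hcmp ih =>
    intro _ hhi h1 h2
    have hmid : lo ≤ mid ∧ mid < hi := by have h : mid = (lo + hi) / 2 := rfl; omega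
    have h1' : ∀ j, j < mid + 1 → lst.getD j 0 ≤ e := by
      intro j hj
      have hstep := sorted_getD hs (i := j) (j := mid) (by omega) (by omega)
      omega
    exact ih (by omega) hhi h1' h2
  | case3 lo hi hge =>
    intro hle _ h1 h2
    exact ⟨by omega, h1, fun j hj hjl => h2 j (by omega) hjl⟩

theorem insortL_eq_insert_at (e : Int) :
    ∀ (lst : List Int) (i : Nat), i ≤ lst.length →
    (∀ j, j < i → lst.getD j 0 ≤ e) →
    (∀ j, i ≤ j → j < lst.length → e < lst.getD j 0) →
    insortL e lst = lst.take i ++ e :: lst.drop i := by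
  intro lst
  induction lst with
  | nil =>
    intro i hi _ _
    have : i = 0 := by simpa using hi
    subst this; simp [insortL]
  | cons x t ih =>
    intro i hi h1 h2
    by_cases hcmp : e < x
    · have hi0 : i = 0 := by
        by_contra h
        have := h1 0 (by omega)
        simp at this; omega
      subst hi0
      simp [insortL, hcmp]
    · have hi0 : i ≠ 0 := by
        intro h
        have := h2 0 (by omega) (by simp)
        simp at this; omega
      obtain ⟨i', rfl⟩ : ∃ i', i = i' + 1 := ⟨i - 1, by omega⟩
      have ht : insortL e t = t.take i' ++ e :: t.drop i' := by
        refine ih i' (by simp at hi; omega) ?_ ?_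
        · intro j hj; have := h1 (j + 1) (by omega); simpa using this
        · intro j hj hjl
          have := h2 (j + 1) (by omega) (by simp; omega); simpa using this
      simp [insortL, hcmp, ht]

theorem insortB_eq_insortL {e : Int} {H : List Int} (h : H.Pairwise (· ≤ ·)) :
    insortB e H = insortL e H := by
  obtain ⟨ha, hb, hc⟩ := bisectLoop_spec e H h 0 H.length (by omega) le_rfl
    (by omega) (by omega)
  exact (insortL_eq_insert_at e H _ ha hb hc).symm

theorem sorted_negrev {H : List Int} (h : H.Pairwise (· ≤ ·)) :
    ((H.map (fun x => -x)).reverse).Pairwise (· ≤ ·) := by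
  rw [List.pairwise_reverse, List.pairwise_map]
  exact h.imp (by intro a b hab; simp; omega)

-- pushing -e into A's heap corresponds to inserting e into B's sorted kept list
theorem push_corr {e : Int} {H : List Int} (h : H.Pairwise (· ≤ ·)) :
    List.orderedInsert (· ≤ ·) (-e) ((H.map (fun x => -x)).reverse)
      = ((insortL e H).map (fun x => -x)).reverse := by
  have hperm : (List.orderedInsert (· ≤ ·) (-e) ((H.map (fun x => -x)).reverse)).Perm
      (((insortL e H).map (fun x => -x)).reverse) := by
    refine (List.perm_orderedInsert _ _ _).trans ?_
    refine List.Perm.trans ?_ (((insortL e H).map (fun x => -x)).reverse_perm).symm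
    exact (List.Perm.cons _ (H.map (fun x => -x)).reverse_perm).trans
      ((perm_insortL e H).map (fun x => -x)).symm
  exact List.Perm.eq_of_pairwise'
    (List.Pairwise.orderedInsert _ _ (sorted_negrev h)) (sorted_negrev (sorted_insortL h)) hperm

-- main loop invariant: A's heap is B's kept list negated and reversed, and total - n = s - n0
theorem loop_eq (n0 : Int) : ∀ (rest : List Int) (answer k s total nA : Int) (kept : List Int),
    kept.Pairwise (· ≤ ·) → total - nA = s - n0 →
    solutionLoopA rest answer ((kept.map (fun x => -x)).reverse) total nA k
      = solutionLoopB n0 rest answer kept s k := by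
  intro rest
  induction rest with
  | nil => intro answer k s total nA kept _ _; simp [solutionLoopA, solutionLoopB]
  | cons e rest ih =>
    intro answer k s total nA kept hsorted hinv
    simp only [solutionLoopA, solutionLoopB]
    rw [insortB_eq_insortL hsorted, push_corr hsorted]
    by_cases hgt : s + e > n0
    · rw [if_pos (show total + e > nA by omega), if_pos hgt]
      by_cases hk : k = 0
      · simp [hk]
      · simp only [if_neg hk]
        have hne := insortL_ne_nil e kept
        have hdec : insortL e kept
            = (insortL e kept).dropLast ++ [(insortL e kept).getLast hne] :=
          (List.dropLast_append_getLast hne).symm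
        set m := (insortL e kept).getLast hne with hm
        set l := (insortL e kept).dropLast with hl
        have hKs : (insortL e kept).Pairwise (· ≤ ·) := sorted_insortL hsorted
        have hls : l.Pairwise (· ≤ ·) := hKs.sublist (List.dropLast_sublist _)
        have hmap : ((insortL e kept).map (fun x => -x)).reverse
            = -m :: (l.map (fun x => -x)).reverse := by
          conv_lhs => rw [hdec]
          simp
        rw [hmap]
        conv_rhs => rw [hdec]
        rw [List.getLast?_concat]
        show solutionLoopA rest (answer + 1) ((l.map (fun x => -x)).reverse)
            (total + e + -m) nA (k - 1) = _
        rw [show total + e + -m = total + e - m by ring]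
        exact ih (answer + 1) (k - 1) (s + e - m) (total + e - m) nA l hls (by omega)
    · rw [if_neg (show ¬ total + e > nA by omega), if_neg hgt,
        show total + e - e = total by ring]
      exact ih (answer + 1) k (s + e) total (nA - e) (insortL e kept)
        (sorted_insortL hsorted) (by omega)

-- ===== VERDICT (by name: the statement is the Claim_ definition above) =====
theorem solution_spec : Claim_equal_solution := by
  intro n k enemy _
  unfold Spec_solution solution solution_alt
  have := loop_eq n enemy 0 k 0 0 n [] (by simp) (by ring)
  simpa using this
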